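-- pv_equiv track=rewrite | github.com/thuangdw/learnPython5hrs | datastructure/queues/queues.py | generate_binary_numbers
-- ===== SOURCE A (Python) =====
-- from collections import deque
--
-- class Queue:
--     """Basic queue implementation using deque for optimal performance"""
--
--     def __init__(self):
--         self.items = deque()
--
--     def enqueue(self, item):
--         """Add item to rear of queue - O(1)"""
--         self.items.append(item)
--
--     def dequeue(self):
--         """Remove and return front item - O(1)"""
--         if not self.is_empty():
--             return self.items.popleft()
--         raise IndexError("Queue is empty")
--
--     def front(self):
--         """Return front item without removing - O(1)"""
--         if not self.is_empty():
--             return self.items[0]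
--         raise IndexError("Queue is empty")
--
--     def rear(self):
--         """Return rear item without removing - O(1)"""
--         if not self.is_empty():
--             return self.items[-1]
--         raise IndexError("Queue is empty")
--
--     def is_empty(self):
--         """Check if queue is empty - O(1)"""
--         return len(self.items) == 0
--
--     def size(self):
--         """Return number of items - O(1)"""
--         return len(self.items)
--
--     def __str__(self):
--         return f"Queue({list(self.items)})"
--
-- def generate_binary_numbers(n):
--     """
--     Generate binary representations of numbers 1 to n using queue
--     Time: O(n), Space: O(n)
--     """
--     if n <= 0:
--         return []
--
--     queue = Queue()
--     result = []
--
--     queue.enqueue("1")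
--
--     for i in range(n):
--         # Get front of queue
--         binary = queue.dequeue()
--         result.append(binary)
--
--         # Generate next level
--         queue.enqueue(binary + "0")
--         queue.enqueue(binary + "1")
--
--     return result
-- ===== SOURCE B (Python) =====
-- def generate_binary_numbers(n):
--     """
--     Generate binary representations of numbers 1 to n by direct
--     conversion: no queue, no BFS.
--     Time: O(n), Space: O(n)
--     """
--     return [format(i, 'b') for i in range(1, n + 1)]
-- ===== Notes on version B (the rewrite author's own statement) =====
-- stated objective: idiomatic
-- what changed: Replaces the queue-based BFS generation (dequeue a string, enqueue its '0'/'1' children) with a direct per-number binary conversion via format(i,'b') over range(1, n+1).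
import Mathlib
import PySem

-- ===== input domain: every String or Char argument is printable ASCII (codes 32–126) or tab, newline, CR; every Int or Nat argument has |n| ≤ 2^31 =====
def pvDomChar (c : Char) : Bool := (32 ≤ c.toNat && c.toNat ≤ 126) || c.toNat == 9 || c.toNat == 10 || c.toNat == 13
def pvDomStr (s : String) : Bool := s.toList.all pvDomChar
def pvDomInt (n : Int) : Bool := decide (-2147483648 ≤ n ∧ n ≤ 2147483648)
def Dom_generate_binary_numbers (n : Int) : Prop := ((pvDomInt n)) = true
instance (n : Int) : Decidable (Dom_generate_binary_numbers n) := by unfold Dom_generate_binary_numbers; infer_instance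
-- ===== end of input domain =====

-- B replaces A's queue-driven BFS generation by a direct per-number binary
-- conversion over range(1, n+1); objective: idiomatic. Return values proved equal.

-- ===== PORT A =====
-- One loop iteration: dequeue the front string, append it to the result,
-- enqueue its "0" and "1" children. The queue is modelled as a list
-- (popleft = head, append = ++ [·]); the [] branch is Python's unreachable
-- IndexError path (the queue is never empty) and returns the state unchanged.
def genStep (st : List String × List String) : List String × List String :=
  match st with
  | ([], _) => st
  | (b :: q, res) => (q ++ [b ++ "0", b ++ "1"], res ++ [b])

def generate_binary_numbers (n : Int) : List String :=
  if n ≤ 0 then []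
  else ((List.range n.toNat).foldl (fun st _ => genStep st) (["1"], [])).2

-- ===== PORT B =====
-- format(i, 'b') ported by hand; exact for i ≥ 1 (the only values B uses it on).
def binStr (m : Nat) : String :=
  if m < 2 then "1"
  else binStr (m / 2) ++ (if m % 2 = 0 then "0" else "1")
decreasing_by exact Nat.div_lt_self (by omega) (by omega)

def generate_binary_numbers_alt (n : Int) : List String :=
  (PySem.List.pyRange 1 (n + 1) 1).map (fun i => binStr i.toNat)

-- ===== PRECONDITION & SPEC =====
def Spec_generate_binary_numbers (n : Int) (out : List String) : Prop := out = generate_binary_numbers_alt n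
instance (n : Int) (out : List String) : Decidable (Spec_generate_binary_numbers n out) := by unfold Spec_generate_binary_numbers; infer_instance

-- ===== CLAIM (what is proved, stated in full; the proofs are below) =====
def Claim_equal_generate_binary_numbers : Prop := ∀ (n : Int), Dom_generate_binary_numbers n → Spec_generate_binary_numbers n (generate_binary_numbers n)

-- ===== LEMMAS AND PROOFS =====

lemma binStr_double (k : Nat) (hk : 1 ≤ k) : binStr (2 * k) = binStr k ++ "0" := by
  rw [binStr]
  have h2 : ¬ 2 * k < 2 := by omega
  have hd : 2 * k / 2 = k := by omega
  have hm : 2 * k % 2 = 0 := by omega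
  simp [h2, hd, hm]

lemma binStr_double_succ (k : Nat) (hk : 1 ≤ k) : binStr (2 * k + 1) = binStr k ++ "1" := by
  rw [binStr]
  have h2 : ¬ 2 * k + 1 < 2 := by omega
  have hd : (2 * k + 1) / 2 = k := by omega
  have hm : (2 * k + 1) % 2 = 1 := by omega
  simp [h2, hd, hm]

-- Loop invariant: after m iterations the result holds binStr 1..m and the
-- queue holds binStr (m+1)..(2m+1), in order.
lemma foldA (m : Nat) :
    (List.range m).foldl (fun st _ => genStep st) (["1"], []) =
      ((List.range' (m + 1) (m + 1)).map binStr, (List.range' 1 m).map binStr) := by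
  induction m with
  | zero => simp [List.range', binStr]
  | succ m ih =>
    rw [List.range_succ, List.foldl_append, ih]
    have hq : List.range' (m + 1) (m + 1) = (m + 1) :: List.range' (m + 2) m := by
      simp [List.range'_succ]
    have hq' : List.range' (m + 2) (m + 2) =
        (List.range' (m + 2) m ++ [2 * m + 2]) ++ [2 * m + 3] := by
      rw [List.range'_concat, List.range'_concat,
        show m + 2 + 1 * m = 2 * m + 2 from by omega,
        show m + 2 + 1 * (m + 1) = 2 * m + 3 from by omega]
    have hr : List.range' 1 (m + 1) = List.range' 1 m ++ [m + 1] := by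
      rw [List.range'_concat, show 1 + 1 * m = m + 1 from by omega]
    have e0 : binStr (2 * m + 2) = binStr (m + 1) ++ "0" := by
      have := binStr_double (m + 1) (by omega); simpa [Nat.mul_add] using this
    have e1 : binStr (2 * m + 3) = binStr (m + 1) ++ "1" := by
      have := binStr_double_succ (m + 1) (by omega); simpa [Nat.mul_add] using this
    simp only [hq, hq', hr, List.foldl_cons, List.foldl_nil, List.map_cons,
      List.map_append, List.map, genStep, e0, e1, List.append_assoc,
      List.cons_append, List.nil_append]

theorem generate_binary_numbers_spec : Claim_equal_generate_binary_numbers := by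
  unfold Claim_equal_generate_binary_numbers Spec_generate_binary_numbers
  intro n _
  unfold generate_binary_numbers generate_binary_numbers_alt
  by_cases hn : n ≤ 0
  · rw [PySem.List.pyRange_one_eq_nil (by omega)]
    simp [hn]
  · rw [PySem.List.pyRange_one, if_neg hn, foldA]
    have hlen : ((n + 1) - 1).toNat = n.toNat := by omega
    dsimp only
    rw [hlen, List.range'_eq_map_range, List.map_map, List.map_map]
    apply List.map_congr_left
    intro k _
    show binStr (1 + k) = binStr ((1 + (k : Int)).toNat)
    congr 1
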